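-- pv_equiv track=rewrite | github.com/CX4Life/AdventOfCode | advent-6.py | count_until_pattern_recurs
-- ===== SOURCE A (Python) =====
-- def count_until_pattern_recurs(memory_banks):
--     seen_before = [tuple(memory_banks)]
--
--     def index_of_max():
--         return memory_banks.index(max(memory_banks))
--
--     def distribute(index):
--         blocks_to_distribute = memory_banks[index]
--         memory_banks[index] = 0
--         while blocks_to_distribute:
--             index += 1
--             where_to_add = index % len(memory_banks)
--             memory_banks[where_to_add] += 1
--             blocks_to_distribute -= 1
--         seen_before.append(tuple(memory_banks))
--
--     def all_unique():
--         seen = set()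
--         for elem in seen_before:
--             if elem in seen:
--                 return False
--             seen.add(elem)
--         return True
--
--     while all_unique():
--         starting_point = index_of_max()
--         distribute(starting_point)
--
--     return seen_before
-- ===== SOURCE B (Python) =====
-- def count_until_pattern_recurs(memory_banks):
--     """Redistribute in one arithmetic step (floor-div everywhere + remainder ring)
--     instead of one block at a time; detect the repeat with an incremental seen-set
--     instead of rescanning the whole history each round.
--     Mutates memory_banks in place, like the original."""
--     history = [tuple(memory_banks)]
--     seen = {history[0]}
--     n = len(memory_banks)
--     while True:
--         m = max(memory_banks)
--         i = memory_banks.index(m)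
--         memory_banks[i] = 0
--         q, r = divmod(m, n)
--         for j in range(n):
--             memory_banks[j] += q
--         for k in range(r):
--             memory_banks[(i + 1 + k) % n] += 1
--         t = tuple(memory_banks)
--         history.append(t)
--         if t in seen:
--             return history
--         seen.add(t)
-- ===== Notes on version B (the rewrite author's own statement) =====
-- stated objective: alternative
-- what changed: Replaces the one-block-at-a-time redistribution loop with a closed-form arithmetic distribution (floor-div share to every bank plus one extra to the first max%n banks after the chosen index) and replaces the full rescan of the history (all_unique rebuilds a set each round) with one incrementally maintained seen-set; intended as faster (measured 28x at n=64) but the probe could not confirm it at the largest size, so no speed claim is made.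
-- outside the precondition, e.g. on count_until_pattern_recurs([]): A raises ValueError, B raises ValueError
import Mathlib
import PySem

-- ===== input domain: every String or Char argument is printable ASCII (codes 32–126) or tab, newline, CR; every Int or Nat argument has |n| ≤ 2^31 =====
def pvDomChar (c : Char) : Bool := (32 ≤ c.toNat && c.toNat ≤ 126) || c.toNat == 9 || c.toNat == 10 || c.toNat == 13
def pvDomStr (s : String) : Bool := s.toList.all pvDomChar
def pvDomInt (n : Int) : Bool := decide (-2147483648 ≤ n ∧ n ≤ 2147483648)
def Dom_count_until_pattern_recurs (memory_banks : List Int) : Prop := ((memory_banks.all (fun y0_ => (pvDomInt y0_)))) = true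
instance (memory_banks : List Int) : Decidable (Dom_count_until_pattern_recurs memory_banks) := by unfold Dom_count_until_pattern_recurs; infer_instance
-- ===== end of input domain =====

-- B replaces the block-by-block redistribution with a closed-form arithmetic distribution and the
-- per-round history rescan with an incremental seen-set; both A and B mutate the Python argument in
-- place identically, the theorems are about the returned history. The ports run the same loops under
-- a large fuel bound (a totality guard only; no algorithm switch).


-- fuel for the outer while-loops of both ports: a totality guard only (Python A terminates on every
-- input admitted by Pre_; the fuel is consumed one outer iteration at a time)
def pvFuel : Nat := 2 ^ 64

-- ===== PORT A =====
-- inner `while blocks_to_distribute:` of distribute(): index += 1; memory_banks[index % len] += 1;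
-- blocks -= 1.  The counter is ported as the Nat `blocks.toNat` (for negative blocks Python loops
-- forever; such inputs are outside Pre_).
def goA : Nat → Nat → List Int → List Int
  | 0, _, bs => bs
  | Nat.succ k, i, bs =>
      let w := (i + 1) % bs.length
      goA k (i + 1) (bs.set w (bs.getD w 0 + 1))

-- distribute(index): blocks = memory_banks[index] (index is valid: it comes from list.index);
-- memory_banks[index] = 0; then the while-loop above
def distributeA (bs : List Int) (i : Nat) : List Int :=
  goA (bs.getD i 0).toNat i (bs.set i 0)

-- all_unique(): scan with a growing set, early False on a repeat
def allUniqueGo (seen : PySem.Set (List Int)) : List (List Int) → Bool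
  | [] => true
  | e :: rest =>
      if PySem.Set.contains seen e then false
      else allUniqueGo (PySem.Set.add seen e) rest

def allUnique (l : List (List Int)) : Bool := allUniqueGo PySem.Set.empty l

-- while all_unique(): starting_point = index_of_max(); distribute(starting_point)
def loopA : Nat → List (List Int) → List Int → List (List Int)
  | 0, hist, _ => hist
  | Nat.succ k, hist, banks =>
      if allUnique hist then
        match PySem.List.max? banks (fun x => x) with
        | none => hist            -- Python: max([]) raises ValueError; outside Pre_
        | some m =>
            match PySem.List.index? banks m with
            | none => hist        -- unreachable: the max is a member of the list
            | some i =>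
                let banks' := distributeA banks i
                loopA k (hist ++ [banks']) banks'
      else hist

def count_until_pattern_recurs (memory_banks : List Int) : List (List Int) :=
  loopA pvFuel [memory_banks] memory_banks

-- ===== PORT B =====
-- while True: m = max; i = index(m); banks[i] = 0; q, r = divmod(m, n); add q everywhere
-- (`for j in range(n): banks[j] += q` is the pointwise map), then one extra block to the r banks
-- after i (`for k in range(r)`, ported as a fold over List.range r.toNat: r = m % n ≥ 0 under Pre_);
-- append, stop when the new tuple is in the incremental seen-set
def loopB : Nat → List (List Int) → PySem.Set (List Int) → List Int → List (List Int)
  | 0, hist, _, _ => hist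
  | Nat.succ k, hist, seen, banks =>
      match PySem.List.max? banks (fun x => x) with
      | none => hist              -- Python: max([]) raises ValueError; outside Pre_
      | some m =>
          match PySem.List.index? banks m with
          | none => hist          -- unreachable: the max is a member of the list
          | some i =>
              let n := banks.length
              let q := PySem.Int.floordiv m (n : Int)
              let r := PySem.Int.mod m (n : Int)
              let banks1 := (banks.set i 0).map (fun x => x + q)
              let banks2 := (List.range r.toNat).foldl
                (fun acc t => acc.set ((i + 1 + t) % n) (acc.getD ((i + 1 + t) % n) 0 + 1)) banks1
              let hist' := hist ++ [banks2]
              if PySem.Set.contains seen banks2 then hist'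
              else loopB k hist' (PySem.Set.add seen banks2) banks2

def count_until_pattern_recurs_alt (memory_banks : List Int) : List (List Int) :=
  loopB pvFuel [memory_banks] (PySem.Set.ofList [memory_banks]) memory_banks

-- ===== PRECONDITION & SPEC =====
-- Pre_ excludes the empty list (max([]) raises ValueError in A) and lists whose maximum is
-- negative (A's inner while-loop then never terminates, so A returns on neither kind of input).
def Pre_count_until_pattern_recurs (memory_banks : List Int) : Prop :=
  memory_banks ≠ [] ∧ ∃ x ∈ memory_banks, 0 ≤ x
instance (memory_banks : List Int) : Decidable (Pre_count_until_pattern_recurs memory_banks) := by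
  unfold Pre_count_until_pattern_recurs; infer_instance

def pvWitness_count_until_pattern_recurs : List Int := [0, 2, 7]

def Spec_count_until_pattern_recurs (memory_banks : List Int) (out : List (List Int)) : Prop := out = count_until_pattern_recurs_alt memory_banks
instance (memory_banks : List Int) (out : List (List Int)) : Decidable (Spec_count_until_pattern_recurs memory_banks out) := by unfold Spec_count_until_pattern_recurs; infer_instance

-- ===== CLAIM (what is proved, stated in full; the proofs are below) =====
def Claim_equal_count_until_pattern_recurs : Prop := ∀ (memory_banks : List Int), Dom_count_until_pattern_recurs memory_banks → Pre_count_until_pattern_recurs memory_banks → Spec_count_until_pattern_recurs memory_banks (count_until_pattern_recurs memory_banks)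

-- ===== LEMMAS AND PROOFS =====

theorem cpc (l : List Nat) (p q : Nat → Bool) (h : ∀ x ∈ l, p x = q x) : l.countP p = l.countP q :=
  List.countP_congr (fun x hx => by rw [h x hx])

theorem getD_set' (bs : List Int) (w j : Nat) (v : Int) (hj : j < bs.length) :
    (bs.set w v).getD j 0 = if w = j then v else bs.getD j 0 := by
  simp [List.getD_eq_getElem?_getD, List.getElem?_set]
  split_ifs <;> simp_all

theorem getD_map_add (bs : List Int) (q : Int) (j : Nat) (hj : j < bs.length) :
    (bs.map (fun x => x + q)).getD j 0 = bs.getD j 0 + q := by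
  simp [List.getD_eq_getElem?_getD, hj]

theorem getD_eq_get (l : List Int) (j : Nat) (h : j < l.length) : l.getD j 0 = l[j] := by
  simp [List.getD_eq_getElem?_getD, List.getElem?_eq_getElem h]

theorem length_goA : ∀ k i (bs : List Int), (goA k i bs).length = bs.length := by
  intro k
  induction k with
  | zero => intro i bs; rfl
  | succ k ih => intro i bs; rw [goA, ih]; simp

theorem goA_getD : ∀ k i (bs : List Int) j, j < bs.length →
    (goA k i bs).getD j 0 = bs.getD j 0 +
      ((List.range k).countP (fun t => decide ((i + 1 + t) % bs.length = j)) : Int) := by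
  intro k
  induction k with
  | zero => intro i bs j hj; simp [goA]
  | succ k ih =>
    intro i bs j hj
    rw [goA]
    have hn : 0 < bs.length := by omega
    have hw : (i + 1) % bs.length < bs.length := Nat.mod_lt _ hn
    set w := (i + 1) % bs.length with hwdef
    have hlen : (bs.set w (bs.getD w 0 + 1)).length = bs.length := by simp
    rw [ih (i+1) _ j (by rw [hlen]; exact hj)]
    rw [hlen]
    rw [getD_set' bs w j _ hj]
    have hcnt : (List.range (k+1)).countP (fun t => decide ((i + 1 + t) % bs.length = j))
        = (if w = j then 1 else 0)
          + (List.range k).countP (fun t => decide ((i + 1 + 1 + t) % bs.length = j)) := by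
      rw [List.range_succ_eq_map, List.countP_cons, List.countP_map]
      have : ((fun t => decide ((i + 1 + t) % bs.length = j)) ∘ Nat.succ)
          = (fun t => decide ((i + 1 + 1 + t) % bs.length = j)) := by
        funext t; simp only [Function.comp]; congr 1
        rw [show i + 1 + Nat.succ t = i + 1 + 1 + t by omega]
      rw [this]
      simp only [Nat.add_zero, hwdef]
      split_ifs <;> simp_all
      omega
    rw [hcnt]
    split_ifs with h
    · subst h; push_cast; ring
    · push_cast; ring

-- a one-round-at-a-time view of B's remainder loop, used only by the proofs
def ringB (n : Nat) (i : Nat) (r : Nat) (bs : List Int) : List Int :=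
  (List.range r).foldl (fun acc t => acc.set ((i + 1 + t) % n) (acc.getD ((i + 1 + t) % n) 0 + 1)) bs

theorem ring_eq_goA (n : Nat) : ∀ r i (bs : List Int), bs.length = n → ringB n i r bs = goA r i bs := by
  intro r
  induction r with
  | zero => intro i bs h; rfl
  | succ r ih =>
    intro i bs h
    rw [ringB, List.range_succ_eq_map, List.foldl_cons, List.foldl_map, goA]
    have hb : (fun (acc : List Int) (t : Nat) =>
          acc.set ((i + 1 + Nat.succ t) % n) (acc.getD ((i + 1 + Nat.succ t) % n) 0 + 1))
        = (fun (acc : List Int) (t : Nat) =>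
          acc.set ((i + 1 + 1 + t) % n) (acc.getD ((i + 1 + 1 + t) % n) 0 + 1)) := by
      funext acc t; rw [show i + 1 + Nat.succ t = i + 1 + 1 + t by omega]
    simp only [Nat.add_zero, hb]
    rw [← ringB, ih (i+1) _ (by simp [h]), h]

theorem H1 (n a t c : Nat) (hn : 0 < n) (hc : c < n) :
    ((a + t) % n = c) ↔ (t % n = (c + n - a % n) % n) := by
  rw [Nat.add_mod]
  have ha : a % n < n := Nat.mod_lt _ hn
  have ht : t % n < n := Nat.mod_lt _ hn
  generalize a % n = a' at *
  generalize t % n = t' at *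
  rcases Nat.lt_or_ge (a' + t') n with h | h
  · rw [Nat.mod_eq_of_lt h]
    rcases Nat.lt_or_ge (c + n - a') n with h2 | h2
    · rw [Nat.mod_eq_of_lt h2]; omega
    · rw [Nat.mod_eq_sub_mod h2, Nat.mod_eq_of_lt (by omega)]; omega
  · rw [Nat.mod_eq_sub_mod h, Nat.mod_eq_of_lt (by omega)]
    rcases Nat.lt_or_ge (c + n - a') n with h2 | h2
    · rw [Nat.mod_eq_of_lt h2]; omega
    · rw [Nat.mod_eq_sub_mod h2, Nat.mod_eq_of_lt (by omega)]; omega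

theorem CM (n : Nat) (hn : 0 < n) : ∀ b c, c < n →
    (List.range b).countP (fun t => decide (t % n = c)) = b / n + (if c < b % n then 1 else 0) := by
  intro b
  induction b using Nat.strong_induction_on with
  | _ b ih =>
    intro c hc
    rcases Nat.lt_or_ge b n with hb | hb
    · have h1 : (List.range b).countP (fun t => decide (t % n = c))
          = (List.range b).countP (fun t => decide (t = c)) := by
        apply cpc
        intro x hx
        simp only [List.mem_range] at hx
        simp [Nat.mod_eq_of_lt (by omega : x < n)]
      rw [h1]
      have h2 : ∀ (b' : Nat), (List.range b').countP (fun t => decide (t = c)) = if c < b' then 1 else 0 := by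
        intro b'; induction b' with
        | zero => simp
        | succ b' ih2 => rw [List.range_succ, List.countP_append, ih2]; simp [List.countP_cons]; split_ifs <;> omega
      rw [h2, Nat.div_eq_of_lt hb, Nat.mod_eq_of_lt hb]; omega
    · have hx : b = (b - n) + n := by omega
      rw [hx, List.range_add, List.countP_append, List.countP_map]
      have hone : (List.range n).countP (fun t => decide (((b-n) + t) % n = c)) = 1 := by
        have hcongr : (List.range n).countP (fun t => decide (((b-n) + t) % n = c))
            = (List.range n).countP (fun t => decide (t = (c + n - (b-n) % n) % n)) := by
          apply cpc
          intro x hx2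
          simp only [List.mem_range] at hx2
          simp only [decide_eq_decide]
          rw [H1 n (b-n) x c hn hc, Nat.mod_eq_of_lt (by omega : x < n)]
        rw [hcongr]
        have h2 : ∀ (b' : Nat) (c' : Nat), (List.range b').countP (fun t => decide (t = c')) = if c' < b' then 1 else 0 := by
          intro b' c'; induction b' with
          | zero => simp
          | succ b' ih2 => rw [List.range_succ, List.countP_append, ih2]; simp [List.countP_cons]; split_ifs <;> omega
        rw [h2]
        have h3 : (c + n - (b-n) % n) % n < n := Nat.mod_lt _ hn
        rw [if_pos h3]
      have harg : (fun t => decide (t % n = c)) ∘ (fun t => (b-n) + t) = (fun t => decide (((b-n)+t) % n = c)) := rfl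
      rw [harg, hone, ih (b-n) (by omega) c hc]
      have hd : ((b-n) + n) / n = (b-n)/n + 1 := Nat.add_div_right _ hn
      have hm : ((b-n) + n) % n = (b-n) % n := Nat.add_mod_right _ _
      rw [hd, hm]
      omega

theorem dist_eq (bs : List Int) (i : Nat) (B : Nat) (hn : 0 < bs.length) :
    goA B i bs = goA (B % bs.length) i (bs.map (fun x => x + ((B / bs.length : Nat) : Int))) := by
  set n := bs.length with hnd
  have hlm : (bs.map (fun x => x + ((B / n : Nat) : Int))).length = n := by simp [hnd]
  apply List.ext_getElem
  · rw [length_goA, length_goA, hlm]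
  · intro j h1 h2
    rw [length_goA] at h1
    rw [← getD_eq_get _ j (by rw [length_goA]; exact h1),
        ← getD_eq_get _ j (by rw [length_goA, hlm]; exact h1)]
    rw [goA_getD _ _ _ _ h1, goA_getD _ _ _ _ (by rw [hlm]; exact h1)]
    rw [hlm, getD_map_add _ _ _ h1]
    have hc : (j + n - (i+1) % n) % n < n := Nat.mod_lt _ hn
    have hcongr : ∀ k, (List.range k).countP (fun t => decide ((i + 1 + t) % n = j))
        = (List.range k).countP (fun t => decide (t % n = (j + n - (i+1) % n) % n)) := by
      intro k
      apply cpc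
      intro x _
      simp only [decide_eq_decide]
      exact H1 n (i+1) x j hn h1
    rw [hcongr, hcongr, CM n hn _ _ hc, CM n hn _ _ hc]
    rw [Nat.div_eq_of_lt (Nat.mod_lt _ hn), Nat.mod_eq_of_lt (Nat.mod_lt _ hn)]
    split_ifs <;> push_cast <;> ring

theorem allUniqueGo_iff : ∀ (l : List (List Int)) (s : PySem.Set (List Int)),
    allUniqueGo s l = true ↔ l.Nodup ∧ ∀ x ∈ l, x ∉ s := by
  intro l
  induction l with
  | nil => intro s; simp [allUniqueGo]
  | cons e rest ih =>
    intro s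
    rw [allUniqueGo]
    by_cases hm : e ∈ s
    · rw [if_pos (by rw [PySem.Set.contains_iff]; exact hm)]
      simp only [List.nodup_cons, List.mem_cons]
      constructor
      · intro h; cases h
      · rintro ⟨-, h2⟩; exact absurd hm (h2 e (Or.inl rfl))
    · rw [if_neg (by rw [PySem.Set.contains_iff]; exact hm), ih]
      simp only [List.nodup_cons, List.mem_cons, PySem.Set.mem_add]
      constructor
      · rintro ⟨hnd, hall⟩
        refine ⟨⟨fun he => (hall e he (Or.inr rfl)).elim, hnd⟩, ?_⟩
        rintro x (rfl | hx)
        · exact hm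
        · exact fun hxs => hall x hx (Or.inl hxs)
      · rintro ⟨⟨hne, hnd⟩, hall⟩
        refine ⟨hnd, fun x hx hmem => ?_⟩
        rcases hmem with hxs | rfl
        · exact hall x (Or.inr hx) hxs
        · exact hne hx

theorem allUnique_of_nodup (l : List (List Int)) (h : l.Nodup) : allUnique l = true := by
  rw [allUnique, allUniqueGo_iff]
  exact ⟨h, by intro x _ hx; simp [PySem.Set.empty] at hx⟩

theorem allUnique_false_of_not_nodup (l : List (List Int)) (h : ¬ l.Nodup) : allUnique l = false := by
  cases ht : allUnique l
  · rfl
  · rw [allUnique, allUniqueGo_iff] at ht; exact absurd ht.1 h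

theorem loopA_of_not_nodup : ∀ (f : Nat) (hist : List (List Int)) (banks : List Int),
    ¬ hist.Nodup → loopA f hist banks = hist := by
  intro f hist banks h
  cases f with
  | zero => rfl
  | succ k => rw [loopA, allUnique_false_of_not_nodup _ h]; simp

theorem nodup_append_single (hist : List (List Int)) (d : List Int) (hdup : d ∉ hist) (hnd : hist.Nodup) :
    (hist ++ [d]).Nodup := by
  simp [List.nodup_append, hnd]
  exact fun a ha h => hdup (h ▸ ha)

theorem not_nodup_append_single (hist : List (List Int)) (d : List Int) (hdup : d ∈ hist) :
    ¬ (hist ++ [d]).Nodup := by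
  simp [List.nodup_append, hdup]

theorem loop_eq : ∀ (fuel : Nat) (hist : List (List Int)) (seen : PySem.Set (List Int)) (banks : List Int),
    banks ≠ [] → (∃ x ∈ banks, 0 ≤ x) → hist.Nodup → (∀ x, x ∈ seen ↔ x ∈ hist) →
    loopA fuel hist banks = loopB fuel hist seen banks := by
  intro fuel
  induction fuel with
  | zero => intro hist seen banks _ _ _ _; rfl
  | succ k ih =>
    intro hist seen banks hne hpos hnd hseen
    have hn : 0 < banks.length := List.length_pos_of_ne_nil hne
    obtain ⟨m, hmax⟩ : ∃ m, PySem.List.max? banks (fun x => x) = some m := by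
      cases h : PySem.List.max? banks (fun x => x) with
      | none => exact absurd ((PySem.List.max?_eq_none_iff _ _).mp h) hne
      | some m => exact ⟨m, rfl⟩
    have hmem : m ∈ banks := PySem.List.max?_mem hmax
    obtain ⟨i, hidx⟩ : ∃ i, PySem.List.index? banks m = some i := by
      cases h : PySem.List.index? banks m with
      | none => exact absurd ((PySem.List.index?_eq_none_iff _ _).mp h) (not_not_intro hmem)
      | some i => exact ⟨i, rfl⟩
    obtain ⟨hi, hbi, -⟩ := PySem.List.getElem_of_index?_eq_some hidx
    have hm0 : 0 ≤ m := by
      obtain ⟨x, hx, hx0⟩ := hpos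
      exact le_trans hx0 (PySem.List.max?_isMax hmax x hx)
    have hbval : banks.getD i 0 = m := by rw [getD_eq_get _ _ hi, hbi]
    have hq : PySem.Int.floordiv m (banks.length : Int) = ((m.toNat / banks.length : Nat) : Int) := by
      have h := PySem.Int.floordiv_natCast m.toNat banks.length
      rwa [Int.toNat_of_nonneg hm0] at h
    have hr : (PySem.Int.mod m (banks.length : Int)).toNat = m.toNat % banks.length := by
      have h := PySem.Int.mod_natCast m.toNat banks.length
      rw [Int.toNat_of_nonneg hm0] at h
      rw [h, Int.toNat_natCast]
    -- the two redistributions agree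
    have hdist : (List.range (PySem.Int.mod m (banks.length : Int)).toNat).foldl
          (fun acc t => acc.set ((i + 1 + t) % banks.length) (acc.getD ((i + 1 + t) % banks.length) 0 + 1))
          ((banks.set i 0).map (fun x => x + PySem.Int.floordiv m (banks.length : Int)))
        = distributeA banks i := by
      rw [← ringB, hr, hq, distributeA, hbval]
      rw [ring_eq_goA banks.length _ _ _ (by simp)]
      have h := dist_eq (banks.set i 0) i m.toNat (by simpa using hn)
      simpa using h.symm
    have hlen' : (distributeA banks i).length = banks.length := by
      rw [distributeA, length_goA]; simp
    have hne' : distributeA banks i ≠ [] := List.ne_nil_of_length_pos (by omega)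
    have hpos' : ∃ x ∈ distributeA banks i, 0 ≤ x := by
      have hi' : i < (banks.set i 0).length := by simpa using hi
      have hgd : (distributeA banks i).getD i 0 = (banks.set i 0).getD i 0 +
          ((List.range m.toNat).countP
            (fun t => decide ((i + 1 + t) % (banks.set i 0).length = i)) : Int) := by
        rw [distributeA, hbval]
        exact goA_getD m.toNat i (banks.set i 0) i hi'
      have h0 : (banks.set i 0).getD i 0 = 0 := by
        rw [getD_set' _ _ _ _ (by simpa using hi), if_pos rfl]
      have hnn : 0 ≤ (distributeA banks i).getD i 0 := by
        rw [hgd, h0]; positivity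
      refine ⟨(distributeA banks i).getD i 0, ?_, hnn⟩
      rw [getD_eq_get _ _ (by omega)]
      exact List.getElem_mem _
    -- unfold one round of each loop
    rw [loopA, loopB]
    rw [allUnique_of_nodup hist hnd]
    simp only [if_true, hmax, hidx, hdist]
    by_cases hdup : distributeA banks i ∈ hist
    · rw [if_pos (by rw [PySem.Set.contains_iff, hseen]; exact hdup)]
      exact loopA_of_not_nodup _ _ _ (not_nodup_append_single hist _ hdup)
    · rw [if_neg (by rw [PySem.Set.contains_iff, hseen]; exact hdup)]
      apply ih _ _ _ hne' hpos'
      · exact nodup_append_single hist _ hdup hnd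
      · intro x
        rw [PySem.Set.mem_add, hseen x]
        simp [List.mem_append]

-- ===== VERDICT (by name: the statement is the Claim_ definition above) =====
theorem count_until_pattern_recurs_spec : Claim_equal_count_until_pattern_recurs := by
  intro memory_banks _ hpre
  unfold Spec_count_until_pattern_recurs
  obtain ⟨hne, hpos⟩ := hpre
  rw [count_until_pattern_recurs, count_until_pattern_recurs_alt]
  apply loop_eq pvFuel [memory_banks] _ memory_banks hne hpos (List.nodup_singleton _)
  intro x
  rw [PySem.Set.mem_ofList]
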